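-- pv_equiv track=rewrite | github.com/sirzzang/coding-practice | Programmers/외톨이알파벳_PCCP_1/solution1.py | solution
-- ===== SOURCE A (Python) =====
-- def solution(input_string):
--
--     char_dict = {}
--     prev = ''
--     for i, v in enumerate(input_string):
--
--         # 뭉쳐서 등장한 경우는 체크하지 않음
--         if v == prev:
--             continue
--
--         # 문자별 첫 등장 위치 기록
--         if v not in char_dict:
--             char_dict[v] = []
--         char_dict[v].append(i)
--         prev = v
--
--     answer = "".join(sorted([k for k in char_dict if len(char_dict[k]) >= 2]))
--
--     return answer if answer else "N"
-- ===== SOURCE B (Python) =====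
-- def solution(input_string):
--     # A letter is lonely iff its occurrences do not form one contiguous block,
--     # i.e. last_index - first_index + 1 > number_of_occurrences.
--     s = list(input_string)
--     n = len(s)
--     lonely = "".join(sorted(
--         c for c in set(s)
--         if (n - 1 - s[::-1].index(c)) - s.index(c) + 1 > s.count(c)
--     ))
--     return lonely if lonely else "N"
-- ===== Notes on version B (the rewrite author's own statement) =====
-- stated objective: alternative
-- what changed: B drops A's run detection entirely: instead of scanning with a prev marker and recording run-start positions per letter, it tests each distinct letter by the span criterion last_index - first_index + 1 > count (occurrences of a single-run letter are one contiguous block), using index on the string and its reverse plus count.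
import Mathlib
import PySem

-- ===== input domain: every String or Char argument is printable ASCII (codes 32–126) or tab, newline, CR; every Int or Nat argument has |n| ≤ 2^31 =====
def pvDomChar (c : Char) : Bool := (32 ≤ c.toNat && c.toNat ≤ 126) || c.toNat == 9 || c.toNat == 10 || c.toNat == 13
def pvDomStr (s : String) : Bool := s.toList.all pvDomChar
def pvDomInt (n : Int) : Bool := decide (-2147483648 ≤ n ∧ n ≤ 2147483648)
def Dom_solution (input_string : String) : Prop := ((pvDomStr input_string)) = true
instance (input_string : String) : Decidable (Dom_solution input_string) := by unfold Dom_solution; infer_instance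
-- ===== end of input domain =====

-- B drops A's run detection (prev marker + dict of run-start positions) and instead tests each
-- distinct letter by the span criterion last_index - first_index + 1 > count (objective: alternative).

-- ===== PORT A =====
-- the for-loop of A: state = (char_dict, prev); prev = '' is modelled as `none`
-- (Python's '' never equals a one-character string, and `none` never equals `some v`)
def solutionLoop : List Char → Int → PySem.Dict Char (List Int) → Option Char → PySem.Dict Char (List Int)
  | [], _, d, _ => d
  | v :: rest, i, d, prev =>
    if some v = prev then solutionLoop rest (i + 1) d prev
    else
      let d1 := if d.contains v then d else d.insert v []
      solutionLoop rest (i + 1) (d1.modify v [] (fun l => l ++ [i])) (some v)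

def solution (input_string : String) : String :=
  let char_dict := solutionLoop input_string.toList 0 PySem.Dict.empty none
  let answer := PySem.List.sorted
      (char_dict.keys.filter (fun k => decide (2 ≤ (char_dict.getD k []).length))) (fun c => c)
  if answer = [] then "N" else String.ofList answer

-- ===== PORT B =====
-- s.index(c) / s[::-1].index(c) are ported as (PySem.List.index? _ c).getD 0: c is drawn from
-- set(s), so the index is always `some _` and Python's ValueError is unreachable.
def solution_alt (input_string : String) : String :=
  let s := input_string.toList
  let n : Int := s.length
  let lonely := PySem.List.sorted
      ((PySem.Set.ofList s).filter (fun c =>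
        decide ((n - 1 - (((PySem.List.index? s.reverse c).getD 0 : Nat) : Int))
                  - (((PySem.List.index? s c).getD 0 : Nat) : Int) + 1
                > (PySem.List.count s c : Int)))) (fun c => c)
  if lonely = [] then "N" else String.ofList lonely

-- ===== PRECONDITION & SPEC =====
def Spec_solution (input_string : String) (out : String) : Prop := out = solution_alt input_string
instance (input_string : String) (out : String) : Decidable (Spec_solution input_string out) := by unfold Spec_solution; infer_instance

-- ===== CLAIM (what is proved, stated in full; the proofs are below) =====
def Claim_equal_solution : Prop := ∀ (input_string : String), Dom_solution input_string → Spec_solution input_string (solution input_string)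

-- ===== LEMMAS AND PROOFS =====

-- the run-representative sequence, relative to the previous character `p`
def repsFrom : Option Char → List Char → List Char
  | _, [] => []
  | p, c :: cs => if some c = p then repsFrom p cs else c :: repsFrom (some c) cs

lemma loop_spec (l : List Char) : ∀ (i : Int) (d : PySem.Dict Char (List Int)) (p : Option Char),
    d.keys.Nodup →
    ((solutionLoop l i d p).keys.Nodup
     ∧ (∀ k, k ∈ (solutionLoop l i d p).keys ↔ k ∈ d.keys ∨ k ∈ repsFrom p l)
     ∧ (∀ k, ((solutionLoop l i d p).getD k []).length
           = (d.getD k []).length + PySem.List.count (repsFrom p l) k)) := by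
  induction l with
  | nil =>
    intro i d p hd
    refine ⟨hd, ?_, ?_⟩ <;> intro k <;> simp [solutionLoop, repsFrom, PySem.List.count]
  | cons v rest ih =>
    intro i d p hd
    by_cases hvp : some v = p
    · have hr : repsFrom p (v :: rest) = repsFrom p rest := by simp [repsFrom, hvp]
      have : solutionLoop (v :: rest) i d p = solutionLoop rest (i + 1) d p := by
        simp [solutionLoop, hvp]
      rw [this, hr]
      exact ih (i + 1) d p hd
    · have hr : repsFrom p (v :: rest) = v :: repsFrom (some v) rest := by
        simp [repsFrom, hvp]
      have hstep : solutionLoop (v :: rest) i d p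
          = solutionLoop rest (i + 1)
              ((if d.contains v then d else d.insert v []).modify v [] (fun l => l ++ [i]))
              (some v) := by
        simp [solutionLoop, hvp]
      set d1 := if d.contains v then d else d.insert v [] with hd1
      set d2 := d1.modify v [] (fun l => l ++ [i]) with hd2
      have hc1 : d1.contains v = true := by
        rw [hd1]; by_cases hc : d.contains v
        · simp [hc]
        · simp [hc, PySem.Dict.contains_insert_self]
      have hkeys1 : d1.keys = if d.contains v then d.keys else d.keys ++ [v] := by
        rw [hd1]; by_cases hc : d.contains v
        · simp [hc]
        · simp [hc, PySem.Dict.keys_insert_of_not_contains d [] (by simpa using hc)]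
      have hkeys2 : d2.keys = d1.keys := by
        rw [hd2, PySem.Dict.keys_modify, PySem.Dict.keys_insert_of_contains d1 _ hc1]
      have hnd2 : d2.keys.Nodup := by
        rw [hkeys2, hkeys1]
        by_cases hc : d.contains v
        · simpa [hc] using hd
        · have hv : v ∉ d.keys := by
            intro hm
            exact hc ((PySem.Dict.contains_iff_mem_keys d v).mpr hm)
          rw [if_neg hc]
          refine List.nodup_append.mpr ⟨hd, by simp, ?_⟩
          intro a ha b hb
          simp only [List.mem_singleton] at hb
          subst hb
          exact fun h => hv (h ▸ ha)
      have hmem2 : ∀ k, k ∈ d2.keys ↔ k ∈ d.keys ∨ k = v := by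
        intro k
        rw [hkeys2, hkeys1]
        by_cases hc : d.contains v
        · have hv : v ∈ d.keys := (PySem.Dict.contains_iff_mem_keys d v).mp hc
          simp [hc]
          intro hk; rw [hk]; exact hv
        · simp [hc]
      have hget1v : d1.getD v [] = d.getD v [] := by
        rw [hd1]; by_cases hc : d.contains v
        · simp [hc]
        · simp [hc, PySem.Dict.getD_insert_self,
            PySem.Dict.getD_of_not_contains d ([] : List Int) (by simpa using hc)]
      have hget_self : (d2.getD v []).length = (d.getD v []).length + 1 := by
        rw [hd2, PySem.Dict.getD_modify_self, hget1v]
        simp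
      have hget_ne : ∀ k, k ≠ v → d2.getD k [] = d.getD k [] := by
        intro k hk
        rw [hd2, PySem.Dict.getD_modify_of_ne _ _ _ hk, hd1]
        by_cases hc : d.contains v
        · simp [hc]
        · rw [if_neg hc, PySem.Dict.getD_insert_of_ne _ _ _ hk]
      obtain ⟨h1, h2, h3⟩ := ih (i + 1) d2 (some v) hnd2
      rw [hstep, hr]
      refine ⟨h1, ?_, ?_⟩
      · intro k
        rw [h2, hmem2]
        simp [List.mem_cons]
        tauto
      · intro k
        rw [h3]
        by_cases hk : k = v
        · subst hk
          rw [hget_self]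
          simp [PySem.List.count]
          omega
        · rw [hget_ne k hk]
          have : PySem.List.count (v :: repsFrom (some v) rest) k
              = PySem.List.count (repsFrom (some v) rest) k := by
            simp [PySem.List.count, Ne.symm hk]
          omega

-- membership of repsFrom: the leading run p is never dropped for a character ≠ p
lemma mem_repsFrom_of_ne (c : Char) : ∀ (xs : List Char) (p : Option Char), p ≠ some c →
    (c ∈ repsFrom p xs ↔ c ∈ xs) := by
  intro xs
  induction xs with
  | nil => intro p _; simp [repsFrom]
  | cons x ys ih =>
    intro p hp
    by_cases hxp : some x = p
    · have hxc : x ≠ c := by intro h; exact hp (by rw [← hxp, h])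
      simp only [repsFrom, if_pos hxp]
      rw [ih p hp]
      simp only [List.mem_cons]
      constructor
      · exact Or.inr
      · rintro (h | h)
        · exact absurd h.symm hxc
        · exact h
    · by_cases hxc : x = c
      · subst hxc
        simp [repsFrom, hxp]
      · simp only [repsFrom, if_neg hxp]
        simp [List.mem_cons, ih (some x) (by simp [hxc])]

lemma mem_of_mem_repsFrom (c : Char) : ∀ (xs : List Char) (p : Option Char),
    c ∈ repsFrom p xs → c ∈ xs := by
  intro xs
  induction xs with
  | nil => intro p h; simp [repsFrom] at h
  | cons x ys ih =>
    intro p h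
    by_cases hxp : some x = p
    · simp only [repsFrom, if_pos hxp] at h
      exact List.mem_cons_of_mem x (ih p h)
    · simp only [repsFrom, if_neg hxp, List.mem_cons] at h
      rcases h with h | h
      · exact h ▸ List.mem_cons_self
      · exact List.mem_cons_of_mem x (ih (some x) h)

-- the `prev` value after traversing xs starting from p
def lastO : Option Char → List Char → Option Char
  | p, [] => p
  | _, x :: xs => lastO (some x) xs

lemma lastO_spec : ∀ (xs : List Char) (p : Option Char),
    lastO p xs = p ∨ ∃ x ∈ xs, lastO p xs = some x := by
  intro xs
  induction xs with
  | nil => intro p; exact Or.inl rfl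
  | cons x ys ih =>
    intro p
    rcases ih (some x) with h | ⟨y, hy, h⟩
    · exact Or.inr ⟨x, List.mem_cons_self, by simpa [lastO] using h⟩
    · exact Or.inr ⟨y, List.mem_cons_of_mem x hy, by simpa [lastO] using h⟩

lemma repsFrom_append : ∀ (xs ys : List Char) (p : Option Char),
    repsFrom p (xs ++ ys) = repsFrom p xs ++ repsFrom (lastO p xs) ys := by
  intro xs
  induction xs with
  | nil => intro ys p; simp [repsFrom, lastO]
  | cons x zs ih =>
    intro ys p
    by_cases hxp : some x = p
    · simp [repsFrom, hxp, ih, lastO]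
    · simp [repsFrom, hxp, ih, lastO]

-- after the first c, a second run of c exists iff some non-c character precedes the LAST c
lemma repsFrom_last_run (c : Char) : ∀ (xs ys : List Char), c ∉ ys →
    (c ∈ repsFrom (some c) (xs ++ c :: ys) ↔ ∃ d ∈ xs, d ≠ c) := by
  intro xs
  induction xs with
  | nil =>
    intro ys hys
    have : repsFrom (some c) ([] ++ c :: ys) = repsFrom (some c) ys := by simp [repsFrom]
    rw [this]
    simp only [List.not_mem_nil, false_and, exists_false, iff_false]
    exact fun h => hys (mem_of_mem_repsFrom c ys (some c) h)
  | cons x zs ih =>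
    intro ys hys
    by_cases hxc : x = c
    · subst hxc
      have : repsFrom (some x) ((x :: zs) ++ x :: ys) = repsFrom (some x) (zs ++ x :: ys) := by
        simp [repsFrom]
      rw [this, ih ys hys]
      constructor
      · rintro ⟨d, hd, hdc⟩; exact ⟨d, List.mem_cons_of_mem x hd, hdc⟩
      · rintro ⟨d, hd, hdc⟩
        rcases List.mem_cons.mp hd with h | h
        · exact absurd h hdc
        · exact ⟨d, h, hdc⟩
    · have hne : ¬ (some x = some c) := fun h => hxc (Option.some.inj h)
      have : repsFrom (some c) ((x :: zs) ++ c :: ys)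
          = x :: repsFrom (some x) (zs ++ c :: ys) := by
        simp only [List.cons_append, repsFrom]
        rw [if_neg hne]
      rw [this]
      have hmem : c ∈ repsFrom (some x) (zs ++ c :: ys) := by
        rw [mem_repsFrom_of_ne c _ (some x) (fun h => hxc (Option.some.inj h))]
        simp
      simp only [List.mem_cons, hmem, or_true, true_iff]
      exact ⟨x, by simp, hxc⟩

-- count < length iff some element differs
lemma count_lt_length_iff (c : Char) (w : List Char) :
    w.count c < w.length ↔ ∃ d ∈ w, d ≠ c := by
  constructor
  · intro h
    by_contra hall
    have : w.count c = w.length := List.count_eq_length.mpr (fun b hb => by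
      by_contra hbc
      exact hall ⟨b, hb, fun he => hbc he.symm⟩)
    omega
  · rintro ⟨d, hd, hdc⟩
    rcases lt_or_eq_of_le (List.count_le_length (l := w) (a := c)) with h | h
    · exact h
    · exact absurd (List.count_eq_length.mp h d hd).symm hdc

-- the B-side filter predicate, written out
def spanLonely (s : List Char) (c : Char) : Prop :=
  ((s.length : Int) - 1 - (((PySem.List.index? s.reverse c).getD 0 : Nat) : Int))
    - (((PySem.List.index? s c).getD 0 : Nat) : Int) + 1 > (PySem.List.count s c : Int)

-- CORE: a letter starts ≥ 2 runs iff its occurrences are not one contiguous block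
lemma core (l : List Char) (c : Char) (hc : c ∈ l) :
    (2 ≤ PySem.List.count (repsFrom none l) c) ↔ spanLonely l c := by
  -- first-occurrence split
  obtain ⟨k, hk⟩ := Option.isSome_iff_exists.mp ((PySem.List.index?_isSome_iff l c).mpr hc)
  obtain ⟨pre, suf, hl, hklen, hpre⟩ := (PySem.List.index?_eq_some_iff l c k).mp hk
  have hcount_pre0 : (repsFrom none pre).count c = 0 :=
    List.count_eq_zero.mpr (fun h => hpre (mem_of_mem_repsFrom c pre none h))
  have hq : lastO none pre ≠ some c := by
    rcases lastO_spec pre none with h | ⟨x, hx, h⟩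
    · simp [h]
    · rw [h]; intro hcc
      exact hpre ((Option.some.inj hcc) ▸ hx)
  have hrun : PySem.List.count (repsFrom none l) c
      = 1 + (repsFrom (some c) suf).count c := by
    rw [hl, repsFrom_append, PySem.List.count_eq, List.count_append, hcount_pre0]
    have : repsFrom (lastO none pre) (c :: suf) = c :: repsFrom (some c) suf := by
      simp only [repsFrom]
      rw [if_neg (fun h => hq h.symm)]
    rw [this]
    simp only [List.count_cons_self]
    omega
  have hrun2 : (2 ≤ PySem.List.count (repsFrom none l) c) ↔ c ∈ repsFrom (some c) suf := by
    rw [hrun]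
    constructor
    · intro h
      exact List.count_pos_iff.mp (by omega)
    · intro h
      have := List.count_pos_iff.mpr h
      omega
  have hcl : l.count c = 1 + suf.count c := by
    rw [hl, List.count_append]
    simp only [List.count_eq_zero.mpr hpre, List.count_cons_self]
    omega
  by_cases hcs : c ∈ suf
  · -- last-occurrence split of suf, via the reverse
    obtain ⟨r, hr⟩ := Option.isSome_iff_exists.mp
      ((PySem.List.index?_isSome_iff suf.reverse c).mpr (List.mem_reverse.mpr hcs))
    obtain ⟨u, w, hrev, hulen, hu⟩ := (PySem.List.index?_eq_some_iff suf.reverse c r).mp hr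
    have hsuf : suf = w.reverse ++ c :: u.reverse := by
      have := congrArg List.reverse hrev
      simpa using this
    have hrevl : l.reverse = suf.reverse ++ (c :: pre.reverse) := by
      rw [hl]; simp
    have hidx_rev : PySem.List.index? l.reverse c = some r := by
      rw [hrevl, PySem.List.index?_append_of_mem _ (List.mem_reverse.mpr hcs), hr]
    have hcw : suf.count c = 1 + w.count c := by
      have h1 : suf.reverse.count c = u.count c + (1 + w.count c) := by
        rw [hrev]; simp; omega
      have h2 : u.count c = 0 := List.count_eq_zero.mpr hu
      rw [← List.count_reverse (l := suf) (a := c)]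
      omega
    have hlen_suf : suf.length = u.length + 1 + w.length := by
      have := congrArg List.length hrev
      simp at this
      omega
    -- both sides reduce to: some element of w differs from c
    rw [hrun2, hsuf, repsFrom_last_run c w.reverse u.reverse
        (by simpa using hu)]
    have hmemw : (∃ d ∈ w.reverse, d ≠ c) ↔ ∃ d ∈ w, d ≠ c := by
      constructor
      · rintro ⟨d, hd, hdc⟩; exact ⟨d, List.mem_reverse.mp hd, hdc⟩
      · rintro ⟨d, hd, hdc⟩; exact ⟨d, List.mem_reverse.mpr hd, hdc⟩
    rw [hmemw, ← count_lt_length_iff]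
    unfold spanLonely
    rw [hk, hidx_rev, PySem.List.count_eq]
    simp only [Option.getD_some]
    have hlen_l : l.length = pre.length + 1 + suf.length := by
      rw [hl]; simp; omega
    have hle : w.count c ≤ w.length := List.count_le_length
    omega
  · -- single run: both sides false
    have hL : ¬ c ∈ repsFrom (some c) suf :=
      fun h => hcs (mem_of_mem_repsFrom c suf (some c) h)
    rw [hrun2]
    simp only [hL, false_iff]
    have hidx_rev : PySem.List.index? l.reverse c = some suf.length := by
      have hrevl : l.reverse = suf.reverse ++ c :: pre.reverse := by
        rw [hl]; simp
      rw [hrevl]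
      exact (PySem.List.index?_eq_some_iff _ c _).mpr
        ⟨suf.reverse, pre.reverse, rfl, by simp, fun h => hcs (List.mem_reverse.mp h)⟩
    unfold spanLonely
    rw [hk, hidx_rev, PySem.List.count_eq, hcl]
    have hlen_l : l.length = pre.length + 1 + suf.length := by
      rw [hl]; simp; omega
    have hcs0 : suf.count c = 0 := List.count_eq_zero.mpr hcs
    simp only [Option.getD_some]
    push_cast
    omega

-- the two sorted selections coincide
lemma sorted_lists_eq (s : List Char) :
    PySem.List.sorted
      ((solutionLoop s 0 PySem.Dict.empty none).keys.filter
        (fun k => decide (2 ≤ ((solutionLoop s 0 PySem.Dict.empty none).getD k []).length)))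
      (fun c => c)
    = PySem.List.sorted
      ((PySem.Set.ofList s).filter (fun c =>
        decide (((s.length : Int) - 1 - (((PySem.List.index? s.reverse c).getD 0 : Nat) : Int))
                  - (((PySem.List.index? s c).getD 0 : Nat) : Int) + 1
                > (PySem.List.count s c : Int)))) (fun c => c) := by
  obtain ⟨hnd, hmem, hlen⟩ :=
    loop_spec s 0 PySem.Dict.empty none (by simp [PySem.Dict.keys_empty])
  set d := solutionLoop s 0 PySem.Dict.empty none with hd
  have hmem' : ∀ k, k ∈ d.keys ↔ k ∈ repsFrom none s := by
    intro k; rw [hmem k]; simp [PySem.Dict.keys_empty]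
  have hlen' : ∀ k, (d.getD k []).length = PySem.List.count (repsFrom none s) k := by
    intro k; rw [hlen k]; simp [PySem.Dict.getD_empty]
  apply PySem.List.sorted_eq_sorted_of_perm _ _ _ (fun a b h => h)
  rw [List.perm_ext_iff_of_nodup (hnd.filter _) ((PySem.Set.nodup_ofList s).filter _)]
  intro k
  rw [List.mem_filter, List.mem_filter, PySem.Set.mem_ofList]
  constructor
  · rintro ⟨h1, h2⟩
    simp only [decide_eq_true_eq] at h2 ⊢
    rw [hlen' k] at h2
    have hks : k ∈ s := mem_of_mem_repsFrom k s none ((hmem' k).mp h1)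
    exact ⟨hks, (core s k hks).mp h2⟩
  · rintro ⟨h1, h2⟩
    simp only [decide_eq_true_eq] at h2 ⊢
    have h2' := (core s k h1).mpr h2
    refine ⟨(hmem' k).mpr ?_, by rw [hlen' k]; exact h2'⟩
    exact (mem_repsFrom_of_ne k s none (by simp)).mpr h1

-- ===== VERDICT (by name: the statement is the Claim_ definition above) =====
theorem solution_spec : Claim_equal_solution := by
  intro input_string _
  show solution input_string = solution_alt input_string
  simp only [solution, solution_alt]
  rw [sorted_lists_eq input_string.toList]
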